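-- pv_equiv track=rewrite | github.com/MatiPl01/Wstep-do-Informatyki | Ćwiczenia/4. Zajęcia/Zadanie10/Program1.py | value_in_every_row_and_column
-- ===== SOURCE A (Python) =====
-- def value_in_every_row_and_column(matrix: list, target_value: 'value that is being searched') -> bool:
--     """Checks if 'target_value' exists in every row and every column of the 'matrix' 2-dimensional list.
--     Return True if searched value was found in every row and column else returns False."""
--     found_columns_indices = set()  # Store indices of columns in which 'target_value' was found
--
--     for row_idx in range(len(matrix)):
--         found_in_row = False
--         for col_idx in range(len(matrix[row_idx])):
--             if matrix[row_idx][col_idx] == target_value: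
--                 found_columns_indices.add(col_idx)
--                 found_in_row = True
--         if not found_in_row:
--             return False
--
--     # If number of columns where 'target_value' was found matches the number of columns in the 'matrix', return True
--     return len(found_columns_indices) == len(matrix[0])
-- ===== SOURCE B (Python) =====
-- def value_in_every_row_and_column(matrix: list, target_value) -> bool:
--     # First pass: every row must contain the target (early exit on the first row lacking it).
--     for row in matrix:
--         if not any(x == target_value for x in row):
--             return False
--     # Second pass: distinct column indices holding the target, compared against row 0's width.
--     columns = {j for row in matrix for j, x in enumerate(row) if x == target_value}
--     return len(columns) == len(matrix[0])
-- ===== Notes on version B (the rewrite author's own statement) =====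
-- stated objective: simpler
-- what changed: Replaces A's single fused loop threading a per-row flag and a growing index set through the same traversal by two separate passes: a row-containment check with early exit, then a set comprehension over all cells collecting matching column indices.
import Mathlib
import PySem

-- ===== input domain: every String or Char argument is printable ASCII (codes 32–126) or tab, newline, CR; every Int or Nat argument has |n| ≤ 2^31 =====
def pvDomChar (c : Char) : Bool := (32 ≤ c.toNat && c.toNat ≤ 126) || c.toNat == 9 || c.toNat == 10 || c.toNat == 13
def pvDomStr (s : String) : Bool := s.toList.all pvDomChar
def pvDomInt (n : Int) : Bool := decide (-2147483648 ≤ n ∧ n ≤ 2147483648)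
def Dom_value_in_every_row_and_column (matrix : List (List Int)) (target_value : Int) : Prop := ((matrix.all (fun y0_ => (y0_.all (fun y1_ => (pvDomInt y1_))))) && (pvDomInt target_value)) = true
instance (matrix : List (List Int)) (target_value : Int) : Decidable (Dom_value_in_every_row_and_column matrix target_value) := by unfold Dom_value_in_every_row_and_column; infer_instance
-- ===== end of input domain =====

-- B replaces A's single fused loop (per-row flag + growing column-index set threaded through one
-- traversal) by two separate passes: a row-containment check with early exit, then a set
-- comprehension collecting matching column indices; objective: simpler decomposition.

-- ===== PORT A =====
-- inner loop: for col_idx in range(len(row)): if row[col_idx] == t: add col_idx; found_in_row = True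
def aRow (t : Int) (s : PySem.Set Int) (found : Bool) (i : Int) : List Int → PySem.Set Int × Bool
  | [] => (s, found)
  | x :: rest =>
    if x = t then aRow t (PySem.Set.add s i) true (i + 1) rest
    else aRow t s found (i + 1) rest

-- outer loop with the early 'return False' when a row had no match
def aRows (t : Int) : List (List Int) → PySem.Set Int → Option (PySem.Set Int)
  | [], s => some s
  | row :: rest, s =>
    let r := aRow t s false 0 row
    if r.2 then aRows t rest r.1 else none

def value_in_every_row_and_column (matrix : List (List Int)) (target_value : Int) : Bool :=
  match aRows target_value matrix PySem.Set.empty with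
  | none => false
  | some s => decide (PySem.Set.len s = (matrix.headD []).length)

-- ===== PORT B =====
-- column indices of the target in one row (the comprehension's per-row contribution)
def bColIdxs (t : Int) (row : List Int) : List Int :=
  (PySem.List.enumerate row).filterMap (fun p => if p.2 = t then some p.1 else none)

def value_in_every_row_and_column_alt (matrix : List (List Int)) (target_value : Int) : Bool :=
  if matrix.all (fun row => row.any (fun x => x == target_value)) then
    decide (PySem.Set.len (PySem.Set.ofList (matrix.flatMap (bColIdxs target_value)))
            = (matrix.headD []).length)
  else false

-- ===== PRECONDITION & SPEC =====
-- Pre_ excludes only the empty matrix, on which the Python A raises IndexError at matrix[0]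
-- (B's Python raises there too).
def Pre_value_in_every_row_and_column (matrix : List (List Int)) (_target_value : Int) : Prop := matrix ≠ []
instance (matrix : List (List Int)) (target_value : Int) : Decidable (Pre_value_in_every_row_and_column matrix target_value) := by unfold Pre_value_in_every_row_and_column; infer_instance
def pvWitness_value_in_every_row_and_column : List (List Int) × Int := ([[1, 2], [2, 1]], 1)

def Spec_value_in_every_row_and_column (matrix : List (List Int)) (target_value : Int) (out : Bool) : Prop := out = value_in_every_row_and_column_alt matrix target_value
instance (matrix : List (List Int)) (target_value : Int) (out : Bool) : Decidable (Spec_value_in_every_row_and_column matrix target_value out) := by unfold Spec_value_in_every_row_and_column; infer_instance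

-- ===== CLAIM (what is proved, stated in full; the proofs are below) =====
def Claim_equal_value_in_every_row_and_column : Prop := ∀ (matrix : List (List Int)) (target_value : Int), Dom_value_in_every_row_and_column matrix target_value → Pre_value_in_every_row_and_column matrix target_value → Spec_value_in_every_row_and_column matrix target_value (value_in_every_row_and_column matrix target_value)

-- ===== LEMMAS AND PROOFS =====

-- A's inner loop = fold Set.add over B's per-row index list, paired with the row's any-test
theorem aRow_eq (t : Int) (row : List Int) : ∀ (s : PySem.Set Int) (found : Bool) (i : Int),
    aRow t s found i row
      = (((PySem.List.enumerate row i).filterMap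
            (fun p => if p.2 = t then some p.1 else none)).foldl PySem.Set.add s,
         found || row.any (fun x => x == t)) := by
  induction row with
  | nil => intro s found i; simp [aRow, PySem.List.enumerate]
  | cons x rest ih =>
    intro s found i
    have hb : (x == t) = decide (x = t) := rfl
    by_cases hx : x = t <;>
      simp [aRow, PySem.List.enumerate, hx, ih, hb]

-- A's outer loop: some (all indices folded in) iff every row passes, none otherwise
theorem aRows_eq (t : Int) (rows : List (List Int)) : ∀ (s : PySem.Set Int),
    aRows t rows s
      = if rows.all (fun row => row.any (fun x => x == t)) then
          some ((rows.flatMap (bColIdxs t)).foldl PySem.Set.add s)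
        else none := by
  induction rows with
  | nil => intro s; simp [aRows]
  | cons row rest ih =>
    intro s
    simp only [aRows, aRow_eq, List.all_cons, List.flatMap_cons]
    by_cases h : row.any (fun x => x == t) = true
    · simp [h, ih, bColIdxs, List.foldl_append]
    · simp [h]

-- ===== VERDICT (by name: the statement is the Claim_ definition above) =====
theorem value_in_every_row_and_column_spec : Claim_equal_value_in_every_row_and_column := by
  intro matrix t _ _
  unfold Spec_value_in_every_row_and_column
  unfold value_in_every_row_and_column value_in_every_row_and_column_alt
  rw [aRows_eq]
  by_cases h : matrix.all (fun row => row.any (fun x => x == t)) = true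
  · simp [h, PySem.Set.ofList_eq_foldl, PySem.Set.empty]
  · simp [h]
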